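-- pv_equiv track=rewrite | github.com/linskin/comSoul | eliminate_left_recursion.py | eliminate_grammar
-- ===== SOURCE A (Python) =====
-- import copy
--
-- def add_production(non_terminal, production, productions):
--     if non_terminal in productions:
--         productions[non_terminal].append(production)
--     else:
--         productions[non_terminal] = [production]
--
-- def remove_production(non_terminal, production, productions):
--     if non_terminal in productions and production in productions[non_terminal]:
--         productions[non_terminal].remove(production)
--         if not productions[non_terminal]:  # If the set becomes empty, remove the key
--             del productions[non_terminal]
--
-- def eliminate_grammar(productions):
--     mid_productions = copy.deepcopy(productions)
--     end_productions = copy.deepcopy(productions)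
--     mid_changed_keys_list = []
--     for key in productions:
--         if "'" in key:
--             mid_changed_keys_list.append(key.replace("'", ''))
--     flg = False
--     for key in mid_productions:
--         if key in mid_changed_keys_list: continue
--         for item in mid_productions[key]:
--             tag = False
--             for i in range(len(item)):
--                 if item[i] in mid_changed_keys_list:
--                     tag = True
--                     flg = True
--                     for item_i in mid_productions[item[i]]:
--                         end_item = item.copy()
--                         end_item.pop(i)
--                         end_item[i:i] = item_i
--                         add_production(key, end_item, end_productions)
--             if tag:
--                 remove_production(key, item, end_productions)
--     return end_productions, flg
-- ===== SOURCE B (Python) =====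
-- def eliminate_grammar(productions):
--     # Build the result dict fresh instead of deepcopy-and-mutate.
--     stripped = {k.replace("'", "") for k in productions if "'" in k}
--     end = {}
--     flg = False
--     for key, items in productions.items():
--         if key in stripped:
--             end[key] = [item.copy() for item in items]
--             continue
--         kept = [item for item in items if not any(s in stripped for s in item)]
--         gen = [item[:i] + rep + item[i + 1:]
--                for item in items
--                for i, s in enumerate(item) if s in stripped
--                for rep in productions[s]]
--         if any(any(s in stripped for s in item) for item in items):
--             flg = True
--         new = kept + gen
--         # a key whose list became empty is dropped (Python's del-on-empty);
--         # a key whose list was empty to begin with stays.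
--         if new or not items:
--             end[key] = new
--     return end, flg
-- ===== Notes on version B (the rewrite author's own statement) =====
-- stated objective: simpler
-- what changed: B builds the result dict fresh per key (kept untagged items followed by all substituted expansions, dropping keys whose list became empty) instead of A's deepcopy followed by in-place append/remove/del mutation of the copied dict.
import Mathlib
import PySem

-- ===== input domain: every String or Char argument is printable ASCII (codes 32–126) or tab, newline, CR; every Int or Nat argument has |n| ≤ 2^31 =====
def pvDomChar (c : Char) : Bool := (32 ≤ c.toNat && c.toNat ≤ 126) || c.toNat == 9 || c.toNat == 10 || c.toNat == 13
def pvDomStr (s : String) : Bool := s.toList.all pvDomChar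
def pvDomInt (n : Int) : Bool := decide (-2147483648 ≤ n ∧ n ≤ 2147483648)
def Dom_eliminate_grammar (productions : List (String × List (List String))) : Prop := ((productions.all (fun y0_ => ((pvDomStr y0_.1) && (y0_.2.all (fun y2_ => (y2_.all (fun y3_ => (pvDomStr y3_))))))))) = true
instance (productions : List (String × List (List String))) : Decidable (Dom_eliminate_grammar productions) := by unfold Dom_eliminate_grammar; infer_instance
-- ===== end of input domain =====

-- B rebuilds the result dict fresh (kept originals + generated expansions per key) instead of
-- A's deepcopy-then-mutate with in-place append/remove/delete; same return value, objective: simpler.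

abbrev pvGram := List (String × List (List String))
abbrev pvDict := PySem.Dict String (List (List String))

-- ===== PORT A =====
-- mid_changed_keys_list: for key in productions: if "'" in key: append key.replace("'","")
def pvChangedA (productions : pvGram) : List String :=
  ((PySem.Dict.mk productions : pvDict).keys).foldl
    (fun acc k => if PySem.Str.isIn "'" k then acc ++ [PySem.Str.replace k "'" ""] else acc) []

-- helper add_production
def pvAddProd (key : String) (v : List String) (e : pvDict) : pvDict :=
  if e.contains key then e.modify key [] (fun l => l ++ [v]) else e.insert key [v]

-- helper remove_production
def pvRemoveProd (key : String) (v : List String) (e : pvDict) : pvDict :=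
  if e.contains key && (e.getD key []).contains v then
    let l' := (PySem.List.remove? (e.getD key []) v).getD (e.getD key [])
    if l' = [] then e.erase key else e.insert key l'
  else e

-- body of `for item in mid_productions[key]` (inner: for i in range(len(item)) with flg/tag; then remove)
def pvStepItem (chg : List String) (mid : pvDict) (key : String)
    (st : pvDict × Bool) (item : List String) : pvDict × Bool :=
  let r := (PySem.List.pyRange 0 (item.length : Int) 1).foldl
    (fun (st2 : pvDict × Bool × Bool) i =>
      if chg.contains (PySem.List.pyGetD item i "") then
        let popped := ((PySem.List.pop? item i).map (fun x => x.2)).getD []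
        ((mid.getD (PySem.List.pyGetD item i "") []).foldl
           (fun e item_i => pvAddProd key (popped.take i.toNat ++ item_i ++ popped.drop i.toNat) e) st2.1,
         true, true)
      else st2)
    (st.1, st.2, false)
  if r.2.2 = true then (pvRemoveProd key item r.1, r.2.1) else (r.1, r.2.1)

-- body of `for key in mid_productions`
def pvStepKey (chg : List String) (mid : pvDict) (st : pvDict × Bool) (key : String) : pvDict × Bool :=
  if chg.contains key then st
  else (mid.getD key []).foldl (pvStepItem chg mid key) st

def eliminate_grammar (productions : pvGram) : pvGram × Bool :=
  let mid : pvDict := ⟨productions⟩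
  let chg := pvChangedA productions
  let res := mid.keys.foldl (pvStepKey chg mid) ((⟨productions⟩ : pvDict), false)
  (res.1.items, res.2)

-- ===== PORT B =====
-- stripped = {k.replace("'","") for k in productions if "'" in k}
def pvStrippedB (productions : pvGram) : PySem.Set String :=
  PySem.Set.ofList (productions.filterMap
    (fun q => if PySem.Str.isIn "'" q.1 then some (PySem.Str.replace q.1 "'" "") else none))

-- the `gen` comprehension, for one item
def pvExpandB (str : PySem.Set String) (mid : pvDict) (item : List String) : List (List String) :=
  (PySem.List.enumerate item 0).flatMap (fun p =>
    if PySem.Set.contains str p.2 then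
      (mid.getD p.2 []).map (fun rep =>
        PySem.List.slice item none (some p.1) ++ rep ++ PySem.List.slice item (some (p.1 + 1)) none)
    else [])

-- body of `for key, items in productions.items()`
def pvStepB (str : PySem.Set String) (mid : pvDict)
    (acc : pvGram × Bool) (kv : String × List (List String)) : pvGram × Bool :=
  if PySem.Set.contains str kv.1 then (acc.1 ++ [(kv.1, kv.2)], acc.2)
  else
    let kept := kv.2.filter (fun item => !(item.any (fun s => PySem.Set.contains str s)))
    let gen := kv.2.flatMap (pvExpandB str mid)
    let flg2 := acc.2 || kv.2.any (fun item => item.any (fun s => PySem.Set.contains str s))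
    let nw := kept ++ gen
    if nw ≠ [] ∨ kv.2 = [] then (acc.1 ++ [(kv.1, nw)], flg2) else (acc.1, flg2)

def eliminate_grammar_alt (productions : pvGram) : pvGram × Bool :=
  let str := pvStrippedB productions
  let mid : pvDict := ⟨productions⟩
  productions.foldl (pvStepB str mid) ([], false)

-- ===== PRECONDITION & SPEC =====
-- Pre_ excludes (a) association lists with duplicate keys, which cannot arise from a Python dict,
-- and (b) inputs where an item of a processed key mentions a stripped primed symbol that is not a
-- key of the dict — there the Python A raises KeyError (mid_productions[item[i]]).
def Pre_eliminate_grammar (productions : pvGram) : Prop :=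
  (productions.map (fun p => p.1)).Nodup ∧
  ∀ p ∈ productions,
    p.1 ∉ productions.filterMap
        (fun q => if PySem.Str.isIn "'" q.1 then some (PySem.Str.replace q.1 "'" "") else none) →
    ∀ item ∈ p.2, ∀ s ∈ item,
      s ∈ productions.filterMap
        (fun q => if PySem.Str.isIn "'" q.1 then some (PySem.Str.replace q.1 "'" "") else none) →
      s ∈ productions.map (fun p => p.1)
instance (productions : pvGram) : Decidable (Pre_eliminate_grammar productions) := by
  unfold Pre_eliminate_grammar; infer_instance

def pvWitness_eliminate_grammar : pvGram :=
  [("S", [["A", "x"]]), ("A", [["y"], []]), ("A'", [["z"]])]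

def Spec_eliminate_grammar (productions : pvGram) (out : pvGram × Bool) : Prop :=
  out = eliminate_grammar_alt productions
instance (productions : pvGram) (out : pvGram × Bool) : Decidable (Spec_eliminate_grammar productions out) := by
  unfold Spec_eliminate_grammar; infer_instance

-- ===== CLAIM (what is proved, stated in full; the proofs are below) =====
def Claim_equal_eliminate_grammar : Prop :=
  ∀ (productions : List (String × List (List String))), Dom_eliminate_grammar productions →
    Pre_eliminate_grammar productions →
    Spec_eliminate_grammar productions (eliminate_grammar productions)

-- ===== LEMMAS AND PROOFS =====

-- tag of an item: item mentions a stripped symbol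
def pvTag (chg : List String) (item : List String) : Bool := item.any (fun s => chg.contains s)

-- expansions of one item, proof-side normal form
def pvGenA (chg : List String) (mid : pvDict) (item : List String) : List (List String) :=
  (PySem.List.enumerate item 0).flatMap (fun p =>
    if chg.contains p.2 then
      (mid.getD p.2 []).map (fun rep => item.take p.1.toNat ++ rep ++ item.drop (p.1.toNat + 1))
    else [])

lemma pv_find?_shape (pre post : List (String × List (List String))) (key : String)
    (L : List (List String)) (hpre : key ∉ pre.map (fun p => p.1)) :
    List.find? (fun p => p.1 == key) (pre ++ (key, L) :: post) = some (key, L) := by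
  rw [List.find?_append]
  have h1 : List.find? (fun p => p.1 == key) pre = none := by
    apply List.find?_eq_none.mpr
    intro x hx
    simp only [beq_iff_eq]
    intro h
    exact hpre (h ▸ List.mem_map_of_mem hx)
  simp [h1]

lemma pv_contains_shape (pre post : List (String × List (List String))) (key : String)
    (L : List (List String)) :
    (PySem.Dict.mk (pre ++ (key, L) :: post) : pvDict).contains key = true := by
  simp [PySem.Dict.contains]

lemma pv_get?_shape (pre post : List (String × List (List String))) (key : String)
    (L : List (List String)) (hpre : key ∉ pre.map (fun p => p.1)) :
    (PySem.Dict.mk (pre ++ (key, L) :: post) : pvDict).get? key = some L := by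
  simp [PySem.Dict.get?, pv_find?_shape pre post key L hpre]

lemma pv_map_self (pre : List (String × List (List String))) (key : String)
    (v : List (List String)) (hpre : key ∉ pre.map (fun p => p.1)) :
    pre.map (fun p => if p.1 == key then (key, v) else p) = pre := by
  have : ∀ p ∈ pre, (fun p => if p.1 == key then (key, v) else p) p = id p := by
    intro p hp
    have : p.1 ≠ key := fun h => hpre (h ▸ List.mem_map_of_mem hp)
    simp [this]
  rw [List.map_congr_left this, List.map_id]

lemma pv_insert_shape (pre post : List (String × List (List String))) (key : String)
    (L v : List (List String)) (hpre : key ∉ pre.map (fun p => p.1))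
    (hpost : key ∉ post.map (fun p => p.1)) :
    (PySem.Dict.mk (pre ++ (key, L) :: post) : pvDict).insert key v
      = PySem.Dict.mk (pre ++ (key, v) :: post) := by
  have hc := pv_contains_shape pre post key L
  simp only [PySem.Dict.insert, hc, if_pos, List.map_append, List.map_cons]
  rw [pv_map_self pre key v hpre, pv_map_self post key v hpost]
  simp

lemma pv_filter_self (pre : List (String × List (List String))) (key : String)
    (hpre : key ∉ pre.map (fun p => p.1)) :
    pre.filter (fun p => !(p.1 == key)) = pre := by
  apply List.filter_eq_self.mpr
  intro p hp
  have : p.1 ≠ key := fun h => hpre (h ▸ List.mem_map_of_mem hp)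
  simp [this]

lemma pv_erase_shape (pre post : List (String × List (List String))) (key : String)
    (L : List (List String)) (hpre : key ∉ pre.map (fun p => p.1))
    (hpost : key ∉ post.map (fun p => p.1)) :
    (PySem.Dict.mk (pre ++ (key, L) :: post) : pvDict).erase key
      = PySem.Dict.mk (pre ++ post) := by
  simp only [PySem.Dict.erase, List.filter_append, List.filter_cons]
  rw [pv_filter_self pre key hpre, pv_filter_self post key hpost]
  simp

lemma pv_getD_shape (pre post : List (String × List (List String))) (key : String)
    (L d : List (List String)) (hpre : key ∉ pre.map (fun p => p.1)) :
    (PySem.Dict.mk (pre ++ (key, L) :: post) : pvDict).getD key d = L := by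
  simp [PySem.Dict.getD, pv_get?_shape pre post key L hpre]

lemma pv_addProd_shape (pre post : List (String × List (List String))) (key : String)
    (L : List (List String)) (v : List String) (hpre : key ∉ pre.map (fun p => p.1))
    (hpost : key ∉ post.map (fun p => p.1)) :
    pvAddProd key v (PySem.Dict.mk (pre ++ (key, L) :: post))
      = PySem.Dict.mk (pre ++ (key, L ++ [v]) :: post) := by
  unfold pvAddProd
  rw [if_pos (pv_contains_shape pre post key L), PySem.Dict.modify,
    pv_getD_shape pre post key L [] hpre, pv_insert_shape pre post key L (L ++ [v]) hpre hpost]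

lemma pv_addFold_shape (pre post : List (String × List (List String))) (key : String)
    (g : List String → List String) (reps : List (List String))
    (hpre : key ∉ pre.map (fun p => p.1)) (hpost : key ∉ post.map (fun p => p.1)) :
    ∀ (L : List (List String)),
    reps.foldl (fun e r => pvAddProd key (g r) e) (PySem.Dict.mk (pre ++ (key, L) :: post))
      = PySem.Dict.mk (pre ++ (key, L ++ reps.map g) :: post) := by
  induction reps with
  | nil => intro L; simp
  | cons r tl ih =>
      intro L
      simp only [List.foldl_cons, pv_addProd_shape pre post key L (g r) hpre hpost, ih,
        List.map_cons]
      rw [List.append_cons L (g r) (tl.map g)]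

lemma pv_removeProd_shape (pre post : List (String × List (List String))) (key : String)
    (L : List (List String)) (v : List String) (hpre : key ∉ pre.map (fun p => p.1))
    (hpost : key ∉ post.map (fun p => p.1)) (hv : v ∈ L) :
    pvRemoveProd key v (PySem.Dict.mk (pre ++ (key, L) :: post))
      = if L.erase v = [] then PySem.Dict.mk (pre ++ post)
        else PySem.Dict.mk (pre ++ (key, L.erase v) :: post) := by
  unfold pvRemoveProd
  rw [pv_getD_shape pre post key L [] hpre]
  have hcv : L.contains v = true := by simpa using hv
  rw [if_pos (by rw [pv_contains_shape pre post key L, hcv]; rfl)]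
  simp only [PySem.List.remove?_eq_some_erase L v hv, Option.getD_some,
    pv_erase_shape pre post key L hpre hpost,
    pv_insert_shape pre post key L (L.erase v) hpre hpost]

lemma pv_take_eraseIdx (item : List String) (k : Nat) (h : k < item.length) :
    (item.eraseIdx k).take k = item.take k := by
  rw [List.eraseIdx_eq_take_drop_succ, List.take_append]
  have h1 : (item.take k).take k = item.take k := by simp
  have h2 : k - (item.take k).length = 0 := by simp; omega
  rw [h1, h2]
  simp

lemma pv_drop_eraseIdx (item : List String) (k : Nat) (h : k < item.length) :
    (item.eraseIdx k).drop k = item.drop (k + 1) := by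
  rw [List.eraseIdx_eq_take_drop_succ, List.drop_append]
  have hl : (item.take k).length = k := by simp; omega
  rw [hl]
  simp

-- the inner position loop of A appends exactly the expansions and computes the tag
lemma pv_inner_loop (chg : List String) (mid : pvDict) (key : String)
    (pre post : List (String × List (List String)))
    (hpre : key ∉ pre.map (fun p => p.1)) (hpost : key ∉ post.map (fun p => p.1))
    (item : List String) :
    ∀ (ps : List (Int × String)), (∀ p ∈ ps, 0 ≤ p.1 ∧ p.1.toNat < item.length) →
    ∀ (L : List (List String)) (f t : Bool),
    ps.foldl
      (fun (st2 : pvDict × Bool × Bool) p =>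
        if chg.contains p.2 then
          let popped := ((PySem.List.pop? item p.1).map (fun x => x.2)).getD []
          ((mid.getD p.2 []).foldl
             (fun e item_i => pvAddProd key (popped.take p.1.toNat ++ item_i ++ popped.drop p.1.toNat) e) st2.1,
           true, true)
        else st2)
      (PySem.Dict.mk (pre ++ (key, L) :: post), f, t)
    = (PySem.Dict.mk (pre ++ (key, L ++ ps.flatMap (fun p =>
          if chg.contains p.2 then
            (mid.getD p.2 []).map (fun rep => item.take p.1.toNat ++ rep ++ item.drop (p.1.toNat + 1))
          else [])) :: post),
       f || ps.any (fun p => chg.contains p.2), t || ps.any (fun p => chg.contains p.2)) := by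
  intro ps
  induction ps with
  | nil => intro _ L f t; simp
  | cons p tl ih =>
    intro hps L f t
    have hp := hps p (by simp)
    have htl : ∀ q ∈ tl, 0 ≤ q.1 ∧ q.1.toNat < item.length := fun q hq => hps q (by simp [hq])
    rw [List.foldl_cons]
    by_cases hcp : chg.contains p.2 = true
    · have hpop : PySem.List.pop? item p.1
          = some (item[p.1.toNat]'hp.2, item.eraseIdx p.1.toNat) := by
        conv_lhs => rw [← Int.toNat_of_nonneg hp.1]
        exact PySem.List.pop?_natCast item p.1.toNat hp.2
      rw [if_pos hcp]
      simp only [hpop, Option.map_some, Option.getD_some,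
        pv_take_eraseIdx item p.1.toNat hp.2, pv_drop_eraseIdx item p.1.toNat hp.2]
      rw [pv_addFold_shape pre post key
          (fun item_i => item.take p.1.toNat ++ item_i ++ item.drop (p.1.toNat + 1))
          (mid.getD p.2 []) hpre hpost L,
        ih htl]
      have hm : p.2 ∈ chg := by simpa using hcp
      simp [List.append_assoc]
      exact ⟨fun h => absurd hm h, Or.inr (Or.inl hm), Or.inr (Or.inl hm)⟩
    · have hcp' : chg.contains p.2 = false := by simpa using hcp
      have hm : p.2 ∉ chg := by simpa using hcp'
      rw [if_neg hcp, ih htl]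
      refine Prod.ext ?_ (Prod.ext ?_ ?_) <;> simp [hm]

lemma pv_genA_of_untag (chg : List String) (mid : pvDict) (item : List String)
    (h : pvTag chg item = false) : pvGenA chg mid item = [] := by
  unfold pvTag at h
  have h' := List.any_eq_false.mp h
  apply List.flatMap_eq_nil_iff.mpr
  intro p hp
  obtain ⟨k, hk, rfl⟩ := (PySem.List.mem_enumerate_iff item 0 p).mp hp
  have := h' item[k] (by simp)
  simp_all

lemma pv_stepItem_shape (chg : List String) (mid : pvDict) (key : String)
    (pre post : List (String × List (List String)))
    (hpre : key ∉ pre.map (fun p => p.1)) (hpost : key ∉ post.map (fun p => p.1))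
    (L : List (List String)) (f : Bool) (it : List String) :
    pvStepItem chg mid key (PySem.Dict.mk (pre ++ (key, L) :: post), f) it
    = if pvTag chg it = true
      then (pvRemoveProd key it (PySem.Dict.mk (pre ++ (key, L ++ pvGenA chg mid it) :: post)),
            f || pvTag chg it)
      else (PySem.Dict.mk (pre ++ (key, L ++ pvGenA chg mid it) :: post), f || pvTag chg it) := by
  have hps : ∀ p ∈ PySem.List.enumerate it 0, 0 ≤ p.1 ∧ p.1.toNat < it.length := by
    intro p hp
    obtain ⟨k, hk, rfl⟩ := (PySem.List.mem_enumerate_iff it 0 p).mp hp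
    constructor
    · simp
    · simpa using hk
  have hinner := pv_inner_loop chg mid key pre post hpre hpost it
      (PySem.List.enumerate it 0) hps L f false
  have e1 : (PySem.List.enumerate it 0).foldl
      (fun (st2 : pvDict × Bool × Bool) p =>
        if chg.contains p.2 then
          let popped := ((PySem.List.pop? it p.1).map (fun x => x.2)).getD []
          ((mid.getD p.2 []).foldl
             (fun e item_i => pvAddProd key (popped.take p.1.toNat ++ item_i ++ popped.drop p.1.toNat) e) st2.1,
           true, true)
        else st2)
      (PySem.Dict.mk (pre ++ (key, L) :: post), f, false)
      = (PySem.List.pyRange 0 (it.length : Int) 1).foldl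
      (fun (st2 : pvDict × Bool × Bool) i =>
        if chg.contains (PySem.List.pyGetD it i "") then
          let popped := ((PySem.List.pop? it i).map (fun x => x.2)).getD []
          ((mid.getD (PySem.List.pyGetD it i "") []).foldl
             (fun e item_i => pvAddProd key (popped.take i.toNat ++ item_i ++ popped.drop i.toNat) e) st2.1,
           true, true)
        else st2)
      (PySem.Dict.mk (pre ++ (key, L) :: post), f, false) := by
    rw [PySem.List.enumerate_eq_map_pyRange it "", List.foldl_map]
    rfl
  rw [e1] at hinner
  have hany : ((PySem.List.enumerate it 0).any fun p => chg.contains p.2) = pvTag chg it := by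
    unfold pvTag
    conv_rhs => rw [← PySem.List.map_snd_enumerate it 0]
    rw [List.any_map]
    rfl
  unfold pvStepItem
  rw [hinner]
  simp only [hany, Bool.false_or]
  rfl

lemma pv_filter_nil_any (chg : List String) (items : List (List String))
    (hf : items.filter (fun u => !pvTag chg u) = []) (hne : items ≠ []) :
    items.any (pvTag chg) = true := by
  have h := List.filter_eq_nil_iff.mp hf
  obtain ⟨u, hu⟩ := List.exists_mem_of_ne_nil items hne
  exact List.any_eq_true.mpr ⟨u, hu, by have := h u hu; simpa using this⟩

-- the per-key item loop of A computes B's fresh list for that key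
lemma pv_items_loop (chg : List String) (mid : pvDict) (key : String)
    (pre post : List (String × List (List String)))
    (hpre : key ∉ pre.map (fun p => p.1)) (hpost : key ∉ post.map (fun p => p.1)) :
    ∀ (items kept gens : List (List String)) (f : Bool),
      (∀ u ∈ kept, pvTag chg u = false) →
    items.foldl (pvStepItem chg mid key)
      (PySem.Dict.mk (pre ++ (key, kept ++ items ++ gens) :: post), f)
    = ((if (kept ++ items.filter (fun u => !pvTag chg u)) ++ (gens ++ items.flatMap (pvGenA chg mid)) = []
            ∧ items.any (pvTag chg) = true
        then PySem.Dict.mk (pre ++ post)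
        else PySem.Dict.mk (pre ++ (key, (kept ++ items.filter (fun u => !pvTag chg u))
              ++ (gens ++ items.flatMap (pvGenA chg mid))) :: post)),
       f || items.any (pvTag chg)) := by
  intro items
  induction items with
  | nil =>
      intro kept gens f _
      simp
  | cons it tl ih =>
      intro kept gens f hkept
      rw [List.foldl_cons, pv_stepItem_shape chg mid key pre post hpre hpost _ f it]
      by_cases ht : pvTag chg it = true
      · rw [if_pos ht]
        have hL : (kept ++ (it :: tl) ++ gens) ++ pvGenA chg mid it
            = kept ++ it :: (tl ++ (gens ++ pvGenA chg mid it)) := by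
          simp [List.append_assoc]
        rw [hL, pv_removeProd_shape pre post key _ it hpre hpost (by simp)]
        have hnotin : it ∉ kept := fun hmem => by
          rw [hkept it hmem] at ht; exact Bool.false_ne_true ht
        have herase : (kept ++ it :: (tl ++ (gens ++ pvGenA chg mid it))).erase it
            = kept ++ (tl ++ (gens ++ pvGenA chg mid it)) := by
          rw [List.erase_append_right _ hnotin, List.erase_cons_head]
        rw [herase]
        by_cases hz : kept ++ (tl ++ (gens ++ pvGenA chg mid it)) = []
        · rw [if_pos hz]
          obtain ⟨hk0, htl0, hg0⟩ : kept = [] ∧ tl = [] ∧ gens ++ pvGenA chg mid it = [] := by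
            rcases List.append_eq_nil_iff.mp hz with ⟨h1, h2⟩
            rcases List.append_eq_nil_iff.mp h2 with ⟨h3, h4⟩
            exact ⟨h1, h3, h4⟩
          obtain ⟨hg1, hg2⟩ := List.append_eq_nil_iff.mp hg0
          subst hk0; subst htl0; subst hg1
          simp [ht, hg2]
        · rw [if_neg hz]
          have hassoc : kept ++ (tl ++ (gens ++ pvGenA chg mid it))
              = kept ++ tl ++ (gens ++ pvGenA chg mid it) := by
            simp [List.append_assoc]
          rw [hassoc, ih kept (gens ++ pvGenA chg mid it) (f || pvTag chg it) hkept]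
          have hfl : (it :: tl).filter (fun u => !pvTag chg u) = tl.filter (fun u => !pvTag chg u) := by
            simp [ht]
          have hfm : (it :: tl).flatMap (pvGenA chg mid) = pvGenA chg mid it ++ tl.flatMap (pvGenA chg mid) :=
            List.flatMap_cons ..
          have hlists : (kept ++ tl.filter (fun u => !pvTag chg u))
                ++ ((gens ++ pvGenA chg mid it) ++ tl.flatMap (pvGenA chg mid))
              = (kept ++ (it :: tl).filter (fun u => !pvTag chg u))
                ++ (gens ++ (it :: tl).flatMap (pvGenA chg mid)) := by
            rw [hfl, hfm]; simp [List.append_assoc]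
          have hany : ((it :: tl).any (pvTag chg)) = true := by simp [ht]
          by_cases hnw : (kept ++ tl.filter (fun u => !pvTag chg u))
              ++ ((gens ++ pvGenA chg mid it) ++ tl.flatMap (pvGenA chg mid)) = []
          · have hcomp : kept = [] ∧ tl.filter (fun u => !pvTag chg u) = []
                ∧ gens = [] ∧ pvGenA chg mid it = [] ∧ tl.flatMap (pvGenA chg mid) = [] := by
              rcases List.append_eq_nil_iff.mp hnw with ⟨h1, h2⟩
              rcases List.append_eq_nil_iff.mp h1 with ⟨h3, h4⟩
              rcases List.append_eq_nil_iff.mp h2 with ⟨h5, h6⟩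
              rcases List.append_eq_nil_iff.mp h5 with ⟨h7, h8⟩
              exact ⟨h3, h4, h7, h8, h6⟩
            have htlne : tl ≠ [] := by
              intro h0
              apply hz
              simp [hcomp.1, h0, hcomp.2.2.1, hcomp.2.2.2.1]
            have htlany : tl.any (pvTag chg) = true :=
              pv_filter_nil_any chg tl hcomp.2.1 htlne
            rw [if_pos ⟨hnw, htlany⟩, if_pos ⟨by rw [← hlists]; exact hnw, hany⟩]
            simp [ht, htlany]
          · rw [if_neg (by intro h; exact hnw h.1),
              if_neg (by intro h; exact hnw (by rw [hlists]; exact h.1))]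
            rw [hlists]
            simp [ht]
      · have ht' : pvTag chg it = false := by simpa using ht
        rw [if_neg ht]
        have hgen : pvGenA chg mid it = [] := pv_genA_of_untag chg mid it ht'
        have hL : (kept ++ (it :: tl) ++ gens) ++ pvGenA chg mid it
            = (kept ++ [it]) ++ tl ++ gens := by
          simp [hgen, List.append_assoc]
        rw [hL, ih (kept ++ [it]) gens (f || pvTag chg it)
          (by intro u hu
              rcases List.mem_append.mp hu with h | h
              · exact hkept u h
              · rw [List.mem_singleton.mp h]; exact ht')]
        have hfl : (it :: tl).filter (fun u => !pvTag chg u)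
            = it :: tl.filter (fun u => !pvTag chg u) := by simp [ht']
        have hlists : ((kept ++ [it]) ++ tl.filter (fun u => !pvTag chg u))
              ++ (gens ++ tl.flatMap (pvGenA chg mid))
            = (kept ++ (it :: tl).filter (fun u => !pvTag chg u))
              ++ (gens ++ (it :: tl).flatMap (pvGenA chg mid)) := by
          rw [hfl, List.flatMap_cons, hgen]
          simp [List.append_assoc]
        have hany : ((it :: tl).any (pvTag chg)) = tl.any (pvTag chg) := by simp [ht']
        rw [hlists]
        have hne1 : (kept ++ (it :: tl).filter (fun u => !pvTag chg u))
              ++ (gens ++ (it :: tl).flatMap (pvGenA chg mid)) ≠ [] := by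
          rw [hfl]; simp
        rw [if_neg (by intro h; exact hne1 h.1), if_neg (by intro h; exact hne1 h.1)]
        simp [ht', hany]

lemma pv_expandB_aux (chg : List String) (str : PySem.Set String) (mid : pvDict)
    (hc : ∀ s, PySem.Set.contains str s = chg.contains s) (item : List String) :
    ∀ (ys : List String) (s : Int), 0 ≤ s →
    (PySem.List.enumerate ys s).flatMap (fun p =>
      if PySem.Set.contains str p.2 then
        (mid.getD p.2 []).map (fun rep =>
          PySem.List.slice item none (some p.1) ++ rep ++ PySem.List.slice item (some (p.1 + 1)) none)
      else [])
    = (PySem.List.enumerate ys s).flatMap (fun p =>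
      if chg.contains p.2 then
        (mid.getD p.2 []).map (fun rep => item.take p.1.toNat ++ rep ++ item.drop (p.1.toNat + 1))
      else []) := by
  intro ys
  induction ys with
  | nil => intro s _; simp [PySem.List.enumerate]
  | cons y ys ih =>
    intro s hs
    rw [PySem.List.enumerate_cons, List.flatMap_cons, List.flatMap_cons, ih (s + 1) (by omega)]
    congr 1
    rw [hc y]
    by_cases hcy : chg.contains y = true
    · simp only [hcy, if_true]
      apply List.map_congr_left
      intro rep _
      rw [PySem.List.slice_to item hs, PySem.List.slice_from item (by omega : (0:Int) ≤ s + 1)]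
      have h1 : (s + 1).toNat = s.toNat + 1 := by omega
      rw [h1]
    · have hm : y ∉ chg := by simpa using hcy
      simp [hm]

lemma pv_expandB_eq (chg : List String) (str : PySem.Set String) (mid : pvDict)
    (hc : ∀ s, PySem.Set.contains str s = chg.contains s) (item : List String) :
    pvExpandB str mid item = pvGenA chg mid item :=
  pv_expandB_aux chg str mid hc item item 0 (by omega)

lemma pv_filterMap_eq (P : pvGram) :
    P.filterMap
        (fun q => if PySem.Str.isIn "'" q.1 then some (PySem.Str.replace q.1 "'" "") else none)
      = ((P.map (fun p => p.1)).filter (fun k => PySem.Str.isIn "'" k)).map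
          (fun k => PySem.Str.replace k "'" "") := by
  induction P with
  | nil => rfl
  | cons a t ih =>
      rw [List.filterMap_cons, List.map_cons, List.filter_cons]
      by_cases h : PySem.Str.isIn "'" a.1 = true
      · rw [if_pos h, if_pos h, List.map_cons, ih]
      · rw [if_neg h, if_neg h, ih]

-- the two "changed keys" computations agree
lemma pv_contains_eq (P : pvGram) (s : String) :
    PySem.Set.contains (pvStrippedB P) s = (pvChangedA P).contains s := by
  have hA : pvChangedA P
      = ((P.map (fun p => p.1)).filter (fun k => PySem.Str.isIn "'" k)).map
          (fun k => PySem.Str.replace k "'" "") := by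
    unfold pvChangedA
    rw [PySem.List.foldl_append_if (fun k => PySem.Str.isIn "'" k)
      (fun k => PySem.Str.replace k "'" "") _ []]
    rfl
  have hB := pv_filterMap_eq P
  unfold pvStrippedB
  rw [hB, hA]
  simp [PySem.Set.contains]

-- the outer key loop
lemma pv_outer_loop (chg : List String) (str : PySem.Set String) (mid : pvDict)
    (hc : ∀ s, PySem.Set.contains str s = chg.contains s) :
    ∀ (rest done : List (String × List (List String))) (f : Bool),
      (rest.map (fun p => p.1)).Nodup →
      (∀ kv ∈ rest, kv.1 ∉ done.map (fun p => p.1)) →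
      (∀ kv ∈ rest, mid.getD kv.1 [] = kv.2) →
    rest.foldl (fun st kv => pvStepKey chg mid st kv.1) (PySem.Dict.mk (done ++ rest), f)
    = (PySem.Dict.mk (rest.foldl (pvStepB str mid) (done, f)).1,
       (rest.foldl (pvStepB str mid) (done, f)).2) := by
  intro rest
  induction rest with
  | nil => intro done f _ _ _; simp
  | cons kv tl ih =>
    intro done f hnd hdisj hmid
    obtain ⟨k, its⟩ := kv
    simp only [List.map_cons, List.nodup_cons] at hnd
    obtain ⟨hknotl, hndtl⟩ := hnd
    have hmidh : mid.getD k [] = its := hmid (k, its) (by simp)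
    have hdisjh : k ∉ done.map (fun p => p.1) := hdisj (k, its) (by simp)
    rw [List.foldl_cons, List.foldl_cons]
    by_cases hck : chg.contains k = true
    · have hAstep : pvStepKey chg mid (PySem.Dict.mk (done ++ (k, its) :: tl), f) k
          = (PySem.Dict.mk (done ++ (k, its) :: tl), f) := by
        unfold pvStepKey
        rw [if_pos hck]
      have hBstep : pvStepB str mid (done, f) (k, its) = (done ++ [(k, its)], f) := by
        unfold pvStepB
        rw [if_pos (by rw [hc k]; exact hck)]
      rw [hAstep, hBstep,
        show done ++ (k, its) :: tl = (done ++ [(k, its)]) ++ tl by simp]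
      exact ih (done ++ [(k, its)]) f hndtl
        (by intro q hq
            simp only [List.map_append, List.map_cons, List.map_nil, List.mem_append,
              List.mem_singleton]
            rintro (h | h)
            · exact hdisj q (by simp [hq]) h
            · exact hknotl (h ▸ List.mem_map_of_mem hq))
        (fun q hq => hmid q (by simp [hq]))
    · have hck' : chg.contains k = false := by simpa using hck
      have hAstep : pvStepKey chg mid (PySem.Dict.mk (done ++ (k, its) :: tl), f) k
          = its.foldl (pvStepItem chg mid k) (PySem.Dict.mk (done ++ (k, its) :: tl), f) := by
        unfold pvStepKey
        rw [if_neg hck, hmidh]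
      have hpost : k ∉ tl.map (fun p => p.1) := hknotl
      have hA := pv_items_loop chg mid k done tl hdisjh hpost its [] [] f (by intro u hu; cases hu)
      simp only [List.nil_append, List.append_nil] at hA
      rw [hAstep, hA]
      -- B side
      have hmem : ∀ s : String, (s ∈ (str : List String)) ↔ s ∈ chg := by
        intro s
        have h := hc s
        simp [PySem.Set.contains] at h
        exact h
      have hfeq : (fun item => !(item.any (fun s => PySem.Set.contains str s)))
          = (fun u => !pvTag chg u) := by
        funext u
        unfold pvTag
        simp [hmem]
      have hgeq : pvExpandB str mid = pvGenA chg mid :=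
        funext (pv_expandB_eq chg str mid hc)
      have hBany : (its.any (fun item => item.any (fun s => PySem.Set.contains str s)))
          = its.any (pvTag chg) := by
        unfold pvTag
        simp [hmem]
      have hBstep : pvStepB str mid (done, f) (k, its)
          = if (its.filter (fun u => !pvTag chg u)) ++ its.flatMap (pvGenA chg mid) ≠ [] ∨ its = []
            then (done ++ [(k, (its.filter (fun u => !pvTag chg u)) ++ its.flatMap (pvGenA chg mid))],
                  f || its.any (pvTag chg))
            else (done, f || its.any (pvTag chg)) := by
        unfold pvStepB
        rw [if_neg (by rw [hc k]; exact hck)]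
        simp only [hfeq, hgeq, hBany]
      rw [hBstep]
      by_cases hnw : (its.filter (fun u => !pvTag chg u)) ++ its.flatMap (pvGenA chg mid) = []
      · by_cases hits : its = []
        · -- nothing tagged and the key's list was empty to begin with: entry (k, []) stays
          subst hits
          rw [if_neg (by simp), if_pos (Or.inr rfl)]
          simp only [List.filter_nil, List.flatMap_nil, List.append_nil, List.any_nil,
            Bool.or_false]
          rw [show done ++ (k, ([] : List (List String))) :: tl
              = (done ++ [(k, ([] : List (List String)))]) ++ tl by simp]
          exact ih _ f hndtl
            (by intro q hq
                simp only [List.map_append, List.map_cons, List.map_nil, List.mem_append,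
                  List.mem_singleton]
                rintro (h | h)
                · exact hdisj q (by simp [hq]) h
                · exact hknotl (h ▸ List.mem_map_of_mem hq))
            (fun q hq => hmid q (by simp [hq]))
        · -- every item expanded away and nothing generated: the key is deleted
          have hany : its.any (pvTag chg) = true :=
            pv_filter_nil_any chg its (List.append_eq_nil_iff.mp hnw).1 hits
          rw [if_pos ⟨hnw, hany⟩,
            if_neg (by intro h; rcases h with h | h; exact h hnw; exact hits h)]
          exact ih done (f || its.any (pvTag chg)) hndtl
            (fun q hq => hdisj q (by simp [hq]))
            (fun q hq => hmid q (by simp [hq]))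
      · rw [if_neg (fun h => hnw h.1), if_pos (Or.inl hnw),
          show done ++ (k, (its.filter (fun u => !pvTag chg u)) ++ its.flatMap (pvGenA chg mid)) :: tl
              = (done ++ [(k, (its.filter (fun u => !pvTag chg u)) ++ its.flatMap (pvGenA chg mid))]) ++ tl
            by simp]
        exact ih _ (f || its.any (pvTag chg)) hndtl
          (by intro q hq
              simp only [List.map_append, List.map_cons, List.map_nil, List.mem_append,
                List.mem_singleton]
              rintro (h | h)
              · exact hdisj q (by simp [hq]) h
              · exact hknotl (h ▸ List.mem_map_of_mem hq))
          (fun q hq => hmid q (by simp [hq]))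

-- mid lookups in a dup-free dict return each entry's own list
lemma pv_mid_getD (P : pvGram) (hnd : (P.map (fun p => p.1)).Nodup) :
    ∀ kv ∈ P, (PySem.Dict.mk P : pvDict).getD kv.1 [] = kv.2 := by
  intro kv hkv
  have hget : (PySem.Dict.mk P : pvDict).get? kv.1 = some kv.2 :=
    PySem.Dict.get?_of_mem_items (PySem.Dict.mk P) (by simpa using hkv) (by simpa [PySem.Dict.keys] using hnd)
  simp [PySem.Dict.getD, hget]

-- ===== VERDICT (by name: the statement is the Claim_ definition above) =====
theorem eliminate_grammar_spec : Claim_equal_eliminate_grammar := by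
  unfold Claim_equal_eliminate_grammar
  intro P _ hpre
  obtain ⟨hnd, -⟩ := hpre
  unfold Spec_eliminate_grammar eliminate_grammar eliminate_grammar_alt
  simp only []
  have hkeys : (PySem.Dict.mk P : pvDict).keys = P.map (fun p => p.1) := rfl
  rw [hkeys, List.foldl_map]
  have hout := pv_outer_loop (pvChangedA P) (pvStrippedB P) (PySem.Dict.mk P)
    (pv_contains_eq P) P [] false hnd (by simp) (pv_mid_getD P hnd)
  simp only [List.nil_append] at hout
  rw [hout]
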